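-- pv_equiv track=rewrite | github.com/TheAnsarya/GameInfo | tools/converters/spaces_to_tabs.py | convert_spaces_to_tabs
-- ===== SOURCE A (Python) =====
-- def convert_spaces_to_tabs(content: str, spaces_per_tab: int = 4) -> str:
-- 	"""Convert leading spaces to tabs."""
-- 	lines = content.split('\n')
-- 	result = []
--
-- 	for line in lines:
-- 		if not line.strip():
-- 			# Empty or whitespace-only line
-- 			result.append('')
-- 			continue
--
-- 		# Count leading spaces
-- 		stripped = line.lstrip(' ')
-- 		leading_spaces = len(line) - len(stripped)
--
-- 		if leading_spaces > 0:
-- 			# Convert to tabs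
-- 			tabs = leading_spaces // spaces_per_tab
-- 			remaining_spaces = leading_spaces % spaces_per_tab
-- 			new_line = '\t' * tabs + ' ' * remaining_spaces + stripped
-- 			result.append(new_line)
-- 		else:
-- 			result.append(line)
--
-- 	return '\n'.join(result)
-- ===== SOURCE B (Python) =====
-- def convert_spaces_to_tabs(content: str, spaces_per_tab: int = 4) -> str:
-- 	"""Convert leading spaces to tabs in one character-level pass (no split/join of a line list)."""
-- 	out = []
-- 	lead = 0          # length of the leading-space run of the current line
-- 	body = []         # characters of the current line after that run
-- 	blank = True      # current line is whitespace-only so far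
--
-- 	def flush():
-- 		if blank:
-- 			return ''
-- 		q, r = divmod(lead, spaces_per_tab) if lead else (0, 0)
-- 		return '\t' * q + ' ' * r + ''.join(body)
--
-- 	for ch in content:
-- 		if ch == '\n':
-- 			out.append(flush())
-- 			lead, body, blank = 0, [], True
-- 		else:
-- 			if blank and ch not in ' \t\r':
-- 				blank = False
-- 			if ch == ' ' and not body:
-- 				lead += 1
-- 			else:
-- 				body.append(ch)
-- 	out.append(flush())
-- 	return '\n'.join(out)
-- ===== Notes on version B (the rewrite author's own statement) =====
-- stated objective: alternative
-- what changed: A splits the content into a line list, loops over it converting each line's leading spaces, and joins; B makes a single character-level pass over the whole string with a running line state (leading-space count, body, blank flag), flushing a converted line at each newline.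
import Mathlib
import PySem

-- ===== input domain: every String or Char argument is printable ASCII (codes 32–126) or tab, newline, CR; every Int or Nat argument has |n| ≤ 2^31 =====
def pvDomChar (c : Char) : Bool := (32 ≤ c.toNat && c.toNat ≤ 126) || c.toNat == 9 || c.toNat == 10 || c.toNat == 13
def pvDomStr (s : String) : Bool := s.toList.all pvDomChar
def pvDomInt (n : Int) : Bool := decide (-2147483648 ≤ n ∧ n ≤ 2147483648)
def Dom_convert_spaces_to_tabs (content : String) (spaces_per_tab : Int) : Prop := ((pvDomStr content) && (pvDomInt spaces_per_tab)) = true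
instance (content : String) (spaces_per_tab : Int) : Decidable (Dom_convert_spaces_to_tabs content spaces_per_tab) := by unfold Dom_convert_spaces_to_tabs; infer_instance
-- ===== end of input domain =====

-- B replaces A's split/loop/join line pipeline by a single character-level pass with a line-state
-- accumulator (alternative decomposition, same behaviour and cost).


-- ===== PORT A =====
def convert_spaces_to_tabs (content : String) (spaces_per_tab : Int) : String :=
  let lines := PySem.Chars.splitOn content.toList ['\n']
  let result : List (List Char) := lines.foldl (fun result line =>
    if PySem.Chars.strip line = [] then
      result ++ [([] : List Char)]
    else
      -- line.lstrip(' '): drop the leading run of ' ' only (exact hand port)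
      let stripped := line.dropWhile (· == ' ')
      let leading_spaces : Int := (line.length : Int) - (stripped.length : Int)
      if leading_spaces > 0 then
        result ++ [PySem.List.pyRepeat ['\t'] (PySem.Int.floordiv leading_spaces spaces_per_tab) ++
          PySem.List.pyRepeat [' '] (PySem.Int.mod leading_spaces spaces_per_tab) ++ stripped]
      else
        result ++ [line]) []
  String.ofList (PySem.Chars.join ['\n'] result)

-- ===== PORT B =====
-- flush(): the finished current line, from the line state (lead, body, blank)
def pvFlushB (spaces_per_tab lead : Int) (body : List Char) (blank : Bool) : List Char :=
  if blank then []
  else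
    let qr : Int × Int :=
      if lead ≠ 0 then (PySem.Int.floordiv lead spaces_per_tab, PySem.Int.mod lead spaces_per_tab)
      else (0, 0)
    PySem.List.pyRepeat ['\t'] qr.1 ++ PySem.List.pyRepeat [' '] qr.2 ++ body

-- one character of the single pass; state = (out, lead, body, blank)
def pvStepB (spaces_per_tab : Int) (st : List (List Char) × Int × List Char × Bool) (ch : Char) :
    List (List Char) × Int × List Char × Bool :=
  let (out, lead, body, blank) := st
  if ch = '\n' then
    (out ++ [pvFlushB spaces_per_tab lead body blank], 0, [], true)
  else
    let blank := if blank && !(ch == ' ' || ch == '\t' || ch == '\r') then false else blank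
    if ch == ' ' && body.isEmpty then (out, lead + 1, body, blank)
    else (out, lead, body ++ [ch], blank)

def convert_spaces_to_tabs_alt (content : String) (spaces_per_tab : Int) : String :=
  let st := content.toList.foldl (pvStepB spaces_per_tab) ([], 0, [], true)
  let out := st.1 ++ [pvFlushB spaces_per_tab st.2.1 st.2.2.1 st.2.2.2]
  String.ofList (PySem.Chars.join ['\n'] out)

-- ===== PRECONDITION & SPEC =====
-- Pre_ excludes exactly the inputs where Python A raises ZeroDivisionError: spaces_per_tab = 0
-- while some line has a non-whitespace character after a leading space (B raises there too).
def Pre_convert_spaces_to_tabs (content : String) (spaces_per_tab : Int) : Prop :=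
  spaces_per_tab ≠ 0 ∨
    ∀ line ∈ PySem.Chars.splitOn content.toList ['\n'],
      PySem.Chars.strip line = [] ∨ line.take 1 ≠ [' ']
instance (content : String) (spaces_per_tab : Int) : Decidable (Pre_convert_spaces_to_tabs content spaces_per_tab) := by unfold Pre_convert_spaces_to_tabs; infer_instance
def pvWitness_convert_spaces_to_tabs : String × Int := ("  if x:\n      y = 1\n\n  z", 4)

def Spec_convert_spaces_to_tabs (content : String) (spaces_per_tab : Int) (out : String) : Prop := out = convert_spaces_to_tabs_alt content spaces_per_tab
instance (content : String) (spaces_per_tab : Int) (out : String) : Decidable (Spec_convert_spaces_to_tabs content spaces_per_tab out) := by unfold Spec_convert_spaces_to_tabs; infer_instance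

-- ===== CLAIM (what is proved, stated in full; the proofs are below) =====
def Claim_equal_convert_spaces_to_tabs : Prop := ∀ (content : String) (spaces_per_tab : Int), Dom_convert_spaces_to_tabs content spaces_per_tab → Pre_convert_spaces_to_tabs content spaces_per_tab → Spec_convert_spaces_to_tabs content spaces_per_tab (convert_spaces_to_tabs content spaces_per_tab)

-- ===== LEMMAS AND PROOFS =====

-- the common per-line transform both programs implement
def pvLineT (spaces_per_tab : Int) (line : List Char) : List Char :=
  if PySem.Chars.strip line = [] then []
  else
    let stripped := line.dropWhile (· == ' ')
    let leading : Int := (line.length : Int) - (stripped.length : Int)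
    if leading > 0 then
      PySem.List.pyRepeat ['\t'] (PySem.Int.floordiv leading spaces_per_tab) ++
        PySem.List.pyRepeat [' '] (PySem.Int.mod leading spaces_per_tab) ++ stripped
    else line

-- whitespace characters B's blank flag tracks
def pvWS (c : Char) : Bool := c == ' ' || c == '\t' || c == '\r'

-- B's mid-line state after reading the non-'\n' prefix pfx of a line
def pvStOf (pfx : List Char) : Int × List Char × Bool :=
  (((pfx.takeWhile (· == ' ')).length : Int), pfx.dropWhile (· == ' '), pfx.all pvWS)

theorem pv_go_acc : ∀ (fuel : Nat) (cs cur : List Char) (acc : List (List Char)),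
    PySem.Chars.splitOn.go ['\n'] fuel cs cur acc =
      acc.reverse ++ PySem.Chars.splitOn.go ['\n'] fuel cs cur [] := by
  intro fuel
  induction fuel with
  | zero => intro cs cur acc; simp [PySem.Chars.splitOn.go]
  | succ fuel ih =>
    intro cs cur acc
    cases cs with
    | nil => simp [PySem.Chars.splitOn.go]
    | cons c rest =>
      rw [PySem.Chars.splitOn.go, PySem.Chars.splitOn.go]
      by_cases h : List.isPrefixOf ['\n'] (c :: rest) = true
      · rw [if_pos h, if_pos h, ih _ _ (cur.reverse :: acc), ih _ _ [cur.reverse]]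
        simp
      · rw [if_neg h, if_neg h, ih rest (c :: cur) acc]

theorem pv_go_fuel : ∀ (fuel fuel' : Nat) (cs cur : List Char) (acc : List (List Char)),
    cs.length < fuel → cs.length < fuel' →
    PySem.Chars.splitOn.go ['\n'] fuel cs cur acc = PySem.Chars.splitOn.go ['\n'] fuel' cs cur acc := by
  intro fuel
  induction fuel with
  | zero => intro fuel' cs cur acc h; omega
  | succ fuel ih =>
    intro fuel' cs cur acc h h'
    match fuel', h' with
    | fuel'+1, h' =>
      cases cs with
      | nil => simp [PySem.Chars.splitOn.go]
      | cons c rest =>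
        rw [PySem.Chars.splitOn.go, PySem.Chars.splitOn.go]
        by_cases hp : List.isPrefixOf ['\n'] (c :: rest) = true
        · rw [if_pos hp, if_pos hp]
          exact ih fuel' _ _ _ (by simp at h ⊢; omega) (by simp at h' ⊢; omega)
        · rw [if_neg hp, if_neg hp]
          exact ih fuel' _ _ _ (by simp at h ⊢; omega) (by simp at h' ⊢; omega)

theorem pv_go_nosep (cs : List Char) : ∀ (fuel : Nat) (cur : List Char) (acc : List (List Char)),
    cs.length < fuel → (∀ c ∈ cs, c ≠ '\n') →
    PySem.Chars.splitOn.go ['\n'] fuel cs cur acc = ((cur.reverse ++ cs) :: acc).reverse := by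
  induction cs with
  | nil =>
    intro fuel cur acc hf _
    match fuel, hf with
    | fuel+1, _ => simp [PySem.Chars.splitOn.go]
  | cons c rest ih =>
    intro fuel cur acc hf hn
    match fuel, hf with
    | fuel+1, hf =>
      rw [PySem.Chars.splitOn.go]
      have hc : c ≠ '\n' := hn c (by simp)
      have : List.isPrefixOf ['\n'] (c :: rest) = false := by
        simp [List.isPrefixOf]; exact fun h => hc h.symm
      rw [this]
      simp only [Bool.false_eq_true, if_false]
      rw [ih fuel (c :: cur) acc (by simpa using Nat.lt_of_succ_lt_succ hf) (fun x hx => hn x (by simp [hx]))]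
      simp

theorem pv_splitOn_nosep (cs : List Char) (h : ∀ c ∈ cs, c ≠ '\n') :
    PySem.Chars.splitOn cs ['\n'] = [cs] := by
  rw [PySem.Chars.splitOn, pv_go_nosep cs (cs.length+1) [] [] (by omega) h]
  simp

theorem pv_go_sep (pfx : List Char) : ∀ (fuel : Nat) (rest cur : List Char) (acc : List (List Char)),
    (pfx ++ '\n' :: rest).length < fuel → (∀ c ∈ pfx, c ≠ '\n') →
    PySem.Chars.splitOn.go ['\n'] fuel (pfx ++ '\n' :: rest) cur acc =
      PySem.Chars.splitOn.go ['\n'] (rest.length + 1) rest [] ((cur.reverse ++ pfx) :: acc) := by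
  induction pfx with
  | nil =>
    intro fuel rest cur acc hf _
    match fuel, hf with
    | fuel+1, hf =>
      rw [List.nil_append, PySem.Chars.splitOn.go]
      have hp : List.isPrefixOf ['\n'] ('\n' :: rest) = true := by simp [List.isPrefixOf]
      rw [if_pos hp]
      simp only [List.length_singleton, List.drop_one, List.tail_cons]
      rw [pv_go_fuel fuel (rest.length + 1) rest [] _ (by simp at hf; omega) (by omega)]
      simp
  | cons c pfx ih =>
    intro fuel rest cur acc hf hn
    match fuel, hf with
    | fuel+1, hf =>
      rw [List.cons_append, PySem.Chars.splitOn.go]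
      have hc : c ≠ '\n' := hn c (by simp)
      have : List.isPrefixOf ['\n'] (c :: (pfx ++ '\n' :: rest)) = false := by
        simp [List.isPrefixOf]; exact fun h => hc h.symm
      rw [this]
      simp only [Bool.false_eq_true, if_false]
      rw [ih fuel rest (c :: cur) acc (by simp at hf ⊢; omega) (fun x hx => hn x (by simp [hx]))]
      simp

theorem pv_splitOn_sep (pfx rest : List Char) (h : ∀ c ∈ pfx, c ≠ '\n') :
    PySem.Chars.splitOn (pfx ++ '\n' :: rest) ['\n'] = pfx :: PySem.Chars.splitOn rest ['\n'] := by
  rw [PySem.Chars.splitOn, PySem.Chars.splitOn,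
    pv_go_sep pfx ((pfx ++ '\n' :: rest).length + 1) rest [] [] (by omega) h,
    pv_go_acc (rest.length + 1) rest [] _]
  simp

theorem pv_strip_nil_iff (cs : List Char) :
    (PySem.Chars.strip cs = [] ↔ ∀ c ∈ cs, PySem.Chars.isspace c) := by
  rw [PySem.Chars.strip, PySem.Chars.rstrip, PySem.Chars.lstrip]
  constructor
  · intro h c hc
    by_cases hall : ∀ x ∈ cs, PySem.Chars.isspace x
    · exact hall c hc
    · exfalso
      simp only [List.reverse_eq_nil_iff, List.dropWhile_eq_nil_iff] at h
      have h2 : ∀ x ∈ cs.dropWhile PySem.Chars.isspace, PySem.Chars.isspace x := by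
        intro x hx; exact h x (by simpa using hx)
      have : ∀ x ∈ cs, PySem.Chars.isspace x := by
        intro x hx
        rcases List.mem_append.1 ((List.takeWhile_append_dropWhile (p := PySem.Chars.isspace) (l := cs)) ▸ hx) with h3 | h3
        · exact List.mem_takeWhile_imp h3
        · exact h2 x h3
      exact hall this
  · intro h
    have : cs.dropWhile PySem.Chars.isspace = [] := List.dropWhile_eq_nil_iff.2 (fun x hx => h x hx)
    simp [this]

theorem pv_char_eq_iff (c d : Char) : (c == d) = (c.toNat == d.toNat) := by
  by_cases h : c = d
  · simp [h]
  · have hne : c.toNat ≠ d.toNat := fun he => h (Char.ext (UInt32.toNat_inj.mp he))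
    simp [h, hne]

theorem pv_ws_isspace (c : Char) (hd : pvDomChar c = true) (hn : c ≠ '\n') :
    PySem.Chars.isspace c = pvWS c := by
  have hdom : ((32 ≤ c.toNat ∧ c.toNat ≤ 126 ∨ c.toNat = 9) ∨ c.toNat = 10) ∨ c.toNat = 13 := by
    simpa only [pvDomChar, Bool.or_eq_true, Bool.and_eq_true, decide_eq_true_eq, beq_iff_eq] using hd
  have h10 : c.toNat ≠ 10 := fun he => hn (Char.ext (UInt32.toNat_inj.mp he))
  have e1 : ' '.toNat = 32 := by decide
  have e2 : '\t'.toNat = 9 := by decide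
  have e3 : '\r'.toNat = 13 := by decide
  rw [Bool.eq_iff_iff]
  simp only [PySem.Chars.isspace, pvWS, pv_char_eq_iff, Bool.or_eq_true, Bool.and_eq_true,
    decide_eq_true_eq, beq_iff_eq, e1, e2, e3]
  omega

theorem pv_strip_nil_iff_ws (line : List Char)
    (hd : ∀ c ∈ line, pvDomChar c = true) (hn : ∀ c ∈ line, c ≠ '\n') :
    (PySem.Chars.strip line = []) ↔ line.all pvWS = true := by
  rw [pv_strip_nil_iff, List.all_eq_true]
  exact ⟨fun h c hc => (pv_ws_isspace c (hd c hc) (hn c hc)) ▸ h c hc,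
    fun h c hc => (pv_ws_isspace c (hd c hc) (hn c hc)).symm ▸ h c hc⟩

theorem pv_blank_update (a b : Bool) : (if a && !b then false else a) = (a && b) := by
  cases a <;> cases b <;> rfl

theorem pv_stepB_nonl (spt : Int) (out : List (List Char)) (pfx : List Char) (ch : Char)
    (hch : ch ≠ '\n') :
    pvStepB spt (out, pvStOf pfx) ch = (out, pvStOf (pfx ++ [ch])) := by
  simp only [pvStepB, pvStOf, if_neg hch, pv_blank_update, List.all_append, List.all_cons,
    List.all_nil, Bool.and_true]
  by_cases hsp : pfx.dropWhile (· == ' ') = []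
  · have hall : ∀ c ∈ pfx, (c == ' ') = true := by
      intro c hc
      rcases List.mem_append.1 ((List.takeWhile_append_dropWhile (p := (· == ' ')) (l := pfx)) ▸ hc) with h3 | h3
      · exact List.mem_takeWhile_imp (p := (· == ' ')) h3
      · rw [hsp] at h3; cases h3
    have htake : pfx.takeWhile (· == ' ') = pfx := List.takeWhile_eq_self_iff.2 hall
    by_cases hc : ch = ' '
    · subst hc
      simp only [hsp, List.isEmpty_nil, Bool.and_true, beq_self_eq_true, if_pos]
      have h1 : (pfx ++ [' ']).takeWhile (· == ' ') = pfx ++ [' '] :=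
        List.takeWhile_eq_self_iff.2 (by
          intro c hc; rcases List.mem_append.1 hc with h | h
          · exact hall c h
          · simp at h; simp [h])
      have h2 : (pfx ++ [' ']).dropWhile (· == ' ') = [] := by
        rw [List.dropWhile_append]
        simp [hsp]
      rw [h1, h2, htake]
      simp [pvWS]
    · have hcb : (ch == ' ') = false := by simp [hc]
      simp only [hcb, Bool.false_and, Bool.false_eq_true, if_false]
      have h1 : (pfx ++ [ch]).takeWhile (· == ' ') = pfx := by
        rw [List.takeWhile_append]
        simp [htake, hcb]
      have h2 : (pfx ++ [ch]).dropWhile (· == ' ') = [ch] := by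
        rw [List.dropWhile_append]
        simp [hsp, hcb]
      rw [h1, h2, htake, hsp]
      simp [pvWS, hcb]
  · have hne : (pfx.dropWhile (· == ' ')).isEmpty = false := by
      simpa [List.isEmpty_iff] using hsp
    have hlt : (pfx.takeWhile (· == ' ')).length ≠ pfx.length := by
      have hsum := congrArg List.length (List.takeWhile_append_dropWhile (p := (· == ' ')) (l := pfx))
      rw [List.length_append] at hsum
      have : 0 < (pfx.dropWhile (· == ' ')).length := List.length_pos_iff.2 hsp
      omega
    simp only [hne, Bool.and_false, Bool.false_eq_true, if_false]
    have h1 : (pfx ++ [ch]).takeWhile (· == ' ') = pfx.takeWhile (· == ' ') := by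
      rw [List.takeWhile_append]
      simp [hlt]
    have h2 : (pfx ++ [ch]).dropWhile (· == ' ') = pfx.dropWhile (· == ' ') ++ [ch] := by
      rw [List.dropWhile_append]
      simp [hsp]
    rw [h1, h2]
    simp [pvWS]

theorem pv_lengths (line : List Char) :
    (line.length : Int) - ((line.dropWhile (· == ' ')).length : Int) =
      ((line.takeWhile (· == ' ')).length : Int) := by
  have := congrArg List.length (List.takeWhile_append_dropWhile (p := (· == ' ')) (l := line))
  rw [List.length_append] at this
  omega

theorem pv_flush_eq_lineT (spt : Int) (line : List Char)
    (hd : ∀ c ∈ line, pvDomChar c = true) (hn : ∀ c ∈ line, c ≠ '\n') :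
    pvFlushB spt (pvStOf line).1 (pvStOf line).2.1 (pvStOf line).2.2 = pvLineT spt line := by
  simp only [pvFlushB, pvStOf, pvLineT]
  by_cases hb : line.all pvWS = true
  · rw [if_pos hb, if_pos ((pv_strip_nil_iff_ws line hd hn).2 hb)]
  · rw [if_neg (by simpa using hb),
      if_neg (fun h => hb ((pv_strip_nil_iff_ws line hd hn).1 h))]
    rw [pv_lengths]
    by_cases ht : line.takeWhile (· == ' ') = []
    · have hl0 : ((line.takeWhile (· == ' ')).length : Int) = 0 := by simp [ht]
      rw [hl0]
      have hdrop : line.dropWhile (· == ' ') = line := by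
        cases hline : line with
        | nil => simp
        | cons c rest =>
          rw [hline] at ht
          rw [List.takeWhile_cons] at ht
          by_cases hc : (c == ' ') = true
          · simp [hc] at ht
          · rw [List.dropWhile_cons]
            simp [hc]
      simp [hdrop, PySem.List.pyRepeat]
    · have hpos : (0 : Int) < ((line.takeWhile (· == ' ')).length : Int) := by
        have : 0 < (line.takeWhile (· == ' ')).length := List.length_pos_iff.2 ht
        exact_mod_cast this
      rw [if_pos hpos, if_pos (by omega)]

theorem pv_foldA_eq_map (spt : Int) (lines : List (List Char)) :
    lines.foldl (fun result line =>
      if PySem.Chars.strip line = [] then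
        result ++ [([] : List Char)]
      else
        let stripped := line.dropWhile (· == ' ')
        let leading_spaces : Int := (line.length : Int) - (stripped.length : Int)
        if leading_spaces > 0 then
          result ++ [PySem.List.pyRepeat ['\t'] (PySem.Int.floordiv leading_spaces spt) ++
            PySem.List.pyRepeat [' '] (PySem.Int.mod leading_spaces spt) ++ stripped]
        else
          result ++ [line]) [] = lines.map (pvLineT spt) := by
  have hfun : (fun (result : List (List Char)) line =>
      if PySem.Chars.strip line = [] then
        result ++ [([] : List Char)]
      else
        let stripped := line.dropWhile (· == ' ')
        let leading_spaces : Int := (line.length : Int) - (stripped.length : Int)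
        if leading_spaces > 0 then
          result ++ [PySem.List.pyRepeat ['\t'] (PySem.Int.floordiv leading_spaces spt) ++
            PySem.List.pyRepeat [' '] (PySem.Int.mod leading_spaces spt) ++ stripped]
        else
          result ++ [line]) = (fun result line => result ++ [pvLineT spt line]) := by
    funext result line
    simp only [pvLineT]
    split_ifs <;> rfl
  rw [hfun, PySem.List.foldl_append_singleton_eq_map]
  simp

theorem pv_foldB_main (spt : Int) (cs : List Char) : ∀ (out : List (List Char)) (pfx : List Char),
    (∀ c ∈ cs, pvDomChar c = true) → (∀ c ∈ pfx, pvDomChar c = true) → (∀ c ∈ pfx, c ≠ '\n') →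
    (let st := cs.foldl (pvStepB spt) (out, pvStOf pfx)
     st.1 ++ [pvFlushB spt st.2.1 st.2.2.1 st.2.2.2]) =
      out ++ (PySem.Chars.splitOn (pfx ++ cs) ['\n']).map (pvLineT spt) := by
  induction cs with
  | nil =>
    intro out pfx _ hdp hnp
    simp only [List.foldl_nil, List.append_nil]
    rw [pv_splitOn_nosep pfx hnp, pv_flush_eq_lineT spt pfx hdp hnp]
    simp
  | cons ch cs ih =>
    intro out pfx hdc hdp hnp
    by_cases hch : ch = '\n'
    · subst hch
      have hstep : pvStepB spt (out, pvStOf pfx) '\n' =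
          (out ++ [pvLineT spt pfx], pvStOf []) := by
        simp only [pvStepB, pv_flush_eq_lineT spt pfx hdp hnp]
        rfl
      rw [List.foldl_cons, hstep,
        ih (out ++ [pvLineT spt pfx]) [] (fun c hc => hdc c (by simp [hc]))
          (by simp) (by simp),
        pv_splitOn_sep pfx cs hnp]
      simp
    · rw [List.foldl_cons, pv_stepB_nonl spt out pfx ch hch,
        ih out (pfx ++ [ch])
          (fun c hc => hdc c (by simp [hc]))
          (fun c hc => by
            rcases List.mem_append.1 hc with h | h
            · exact hdp c h
            · simp at h; subst h; exact hdc c (by simp))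
          (fun c hc => by
            rcases List.mem_append.1 hc with h | h
            · exact hnp c h
            · simp at h; subst h; exact hch)]
      simp

-- ===== VERDICT (by name: the statement is the Claim_ definition above) =====
theorem convert_spaces_to_tabs_spec : Claim_equal_convert_spaces_to_tabs := by
  intro content spt hdom _hpre
  have hd : ∀ c ∈ content.toList, pvDomChar c = true := by
    simp only [Dom_convert_spaces_to_tabs, Bool.and_eq_true, pvDomStr, List.all_eq_true] at hdom
    exact hdom.1
  show convert_spaces_to_tabs content spt = convert_spaces_to_tabs_alt content spt
  rw [convert_spaces_to_tabs, convert_spaces_to_tabs_alt]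
  have hB := pv_foldB_main spt content.toList [] [] hd (by simp) (by simp)
  simp only [List.nil_append] at hB
  rw [pv_foldA_eq_map spt]
  rw [show (([], 0, [], true) : List (List Char) × Int × List Char × Bool) = ([], pvStOf []) from rfl, hB]
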